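-- pv_equiv track=rewrite | github.com/luvaymoiz/UGCC | routes/operationsafeguard.py | double_consonants_decode
-- ===== SOURCE A (Python) =====
-- VOWELS = set("aeiouAEIOU")
--
-- def double_consonants_decode(s: str) -> str:
--     out = []
--     i = 0
--     while i < len(s):
--         c = s[i]
--         if c.isalpha() and c not in VOWELS and i + 1 < len(s) and s[i+1] == c:
--             out.append(c)
--             i += 2
--         else:
--             out.append(c)
--             i += 1
--     return "".join(out)
-- ===== SOURCE B (Python) =====
-- VOWELS = set("aeiouAEIOU")
--
-- def double_consonants_decode(s: str) -> str:
--     # run-length pass: split s into maximal runs of equal chars,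
--     # a consonant run of length L collapses to ceil(L/2) copies.
--     out = []
--     i = 0
--     n = len(s)
--     while i < n:
--         c = s[i]
--         j = i + 1
--         while j < n and s[j] == c:
--             j += 1
--         L = j - i
--         if c.isalpha() and c not in VOWELS:
--             out.append(c * ((L + 1) // 2))
--         else:
--             out.append(c * L)
--         i = j
--     return "".join(out)
-- ===== Notes on version B (the rewrite author's own statement) =====
-- stated objective: alternative
-- what changed: B splits the string into maximal runs of equal characters and emits ceil(L/2) copies for a consonant run of length L (L copies otherwise), replacing A's char-by-char skip loop with a run-length computation.
import Mathlib
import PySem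

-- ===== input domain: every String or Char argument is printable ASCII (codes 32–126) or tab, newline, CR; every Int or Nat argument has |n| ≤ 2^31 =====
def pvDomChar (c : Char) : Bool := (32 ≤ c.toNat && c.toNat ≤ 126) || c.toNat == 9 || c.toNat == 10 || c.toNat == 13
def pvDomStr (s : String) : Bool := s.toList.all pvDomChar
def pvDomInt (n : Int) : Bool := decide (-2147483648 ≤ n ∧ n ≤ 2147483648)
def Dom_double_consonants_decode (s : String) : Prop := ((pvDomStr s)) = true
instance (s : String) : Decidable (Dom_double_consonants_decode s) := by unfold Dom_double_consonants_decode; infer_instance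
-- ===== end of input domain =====

-- ===== PORT A =====
-- B differs from A only in algorithm (run-length runs vs char-by-char skip); same return value.
def pvVowels : List Char := ['a','e','i','o','u','A','E','I','O','U']

-- A's while loop over indices, as structural recursion on the remaining characters:
-- s[i] = c, s[i+1] = rest.head?.
def pvAGo : List Char → List Char
  | [] => []
  | c :: rest =>
    if PySem.Chars.isalpha c = true ∧ c ∉ pvVowels ∧ rest.head? = some c then
      c :: pvAGo rest.tail
    else
      c :: pvAGo rest
  termination_by l => l.length
  decreasing_by
    · simp only [List.length_cons]
      have : rest.tail.length ≤ rest.length := by cases rest <;> simp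
      omega
    · simp

def double_consonants_decode (s : String) : String := String.mk (pvAGo s.toList)

-- ===== PORT B =====
-- B: consume a maximal run of the leading character, emit ceil(L/2) copies for a
-- consonant run of length L, L copies otherwise.
def pvBGo : List Char → List Char
  | [] => []
  | c :: rest =>
    let L := (rest.takeWhile (· == c)).length + 1
    let k := if PySem.Chars.isalpha c && !(pvVowels.contains c) then (L + 1) / 2 else L
    List.replicate k c ++ pvBGo (rest.dropWhile (· == c))
  termination_by l => l.length
  decreasing_by
    simp only [List.length_cons]
    have := List.length_dropWhile_le (p := (· == c)) (l := rest)
    omega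

def double_consonants_decode_alt (s : String) : String := String.mk (pvBGo s.toList)

-- ===== PRECONDITION & SPEC =====
def Spec_double_consonants_decode (s : String) (out : String) : Prop := out = double_consonants_decode_alt s
instance (s : String) (out : String) : Decidable (Spec_double_consonants_decode s out) := by unfold Spec_double_consonants_decode; infer_instance

-- ===== CLAIM (what is proved, stated in full; the proofs are below) =====
def Claim_equal_double_consonants_decode : Prop := ∀ (s : String), Dom_double_consonants_decode s → Spec_double_consonants_decode s (double_consonants_decode s)

-- ===== LEMMAS AND PROOFS =====

-- A on a non-consonant run copies every character.
lemma pvAGo_run_other (c : Char) (hc : ¬ (PySem.Chars.isalpha c = true ∧ c ∉ pvVowels)) :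
    ∀ (L : Nat) (rest : List Char),
      pvAGo (List.replicate L c ++ rest) = List.replicate L c ++ pvAGo rest := by
  intro L
  induction L with
  | zero => intro rest; simp
  | succ n ih =>
    intro rest
    rw [List.replicate_succ, List.cons_append, pvAGo]
    rw [if_neg (by tauto)]
    rw [ih rest]
    simp

-- A on a consonant run of length L (not followed by another c) keeps ceil(L/2) characters.
lemma pvAGo_run_cons (c : Char) (hc : PySem.Chars.isalpha c = true ∧ c ∉ pvVowels) :
    ∀ (L : Nat) (rest : List Char), rest.head? ≠ some c →
      pvAGo (List.replicate L c ++ rest) = List.replicate ((L + 1) / 2) c ++ pvAGo rest := by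
  intro L
  induction L using Nat.strong_induction_on with
  | _ L ih =>
    intro rest hrest
    match L with
    | 0 => simp
    | 1 =>
      have h1 : List.replicate 1 c ++ rest = c :: rest := by simp
      rw [h1, pvAGo, if_neg (by tauto)]
      simp
    | (n + 2) =>
      rw [List.replicate_succ, List.replicate_succ, List.cons_append, List.cons_append, pvAGo]
      rw [if_pos (by refine ⟨hc.1, hc.2, ?_⟩; simp)]
      rw [List.tail_cons]
      rw [ih n (by omega) rest hrest]
      have h2 : (n + 2 + 1) / 2 = (n + 1) / 2 + 1 := by omega
      rw [h2, List.replicate_succ]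
      simp

lemma pvTakeWhile_eq_replicate (c : Char) (l : List Char) :
    l.takeWhile (· == c) = List.replicate (l.takeWhile (· == c)).length c := by
  rw [List.eq_replicate_iff]
  refine ⟨rfl, ?_⟩
  intro b hb
  have := List.takeWhile_subset (p := (· == c)) (l := l)
  have hp := List.mem_takeWhile_imp hb
  simpa using hp

lemma pvDropWhile_head (c : Char) (l : List Char) :
    (l.dropWhile (· == c)).head? ≠ some c := by
  intro h
  have := List.head?_dropWhile_not (p := (· == c)) (l := l)
  rw [h] at this
  simp at this

-- Main equivalence on lists.
lemma pvAGo_eq_pvBGo : ∀ (l : List Char), pvAGo l = pvBGo l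
  | [] => by rw [pvAGo, pvBGo]
  | c :: rest => by
      rw [pvBGo]
      have hsplit : c :: rest
          = List.replicate ((rest.takeWhile (· == c)).length + 1) c ++ rest.dropWhile (· == c) := by
        rw [List.replicate_succ, List.cons_append]
        congr 1
        conv_lhs => rw [← List.takeWhile_append_dropWhile (p := (· == c)) (l := rest)]
        congr 1
        exact pvTakeWhile_eq_replicate c rest
      have hrec : pvAGo (rest.dropWhile (· == c)) = pvBGo (rest.dropWhile (· == c)) :=
        pvAGo_eq_pvBGo (rest.dropWhile (· == c))
      by_cases hc : PySem.Chars.isalpha c = true ∧ c ∉ pvVowels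
      · have hb : (PySem.Chars.isalpha c && !(pvVowels.contains c)) = true := by
          simp [hc.1]
          simpa using hc.2
        rw [hsplit, pvAGo_run_cons c hc _ _ (pvDropWhile_head c rest), hrec, hb]
        simp
      · have hb : (PySem.Chars.isalpha c && !(pvVowels.contains c)) = false := by
          rcases not_and_or.mp hc with h | h
          · simp [Bool.not_eq_true] at h; simp [h]
          · rw [not_not] at h
            have hcont : pvVowels.contains c = true := by simpa using h
            rw [hcont]
            simp
        rw [hsplit, pvAGo_run_other c hc, hrec, hb]
        simp
  termination_by l => l.length
  decreasing_by
    simp only [List.length_cons]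
    have := List.length_dropWhile_le (p := (· == c)) (l := rest)
    omega

-- ===== VERDICT (by name: the statement is the Claim_ definition above) =====
theorem double_consonants_decode_spec : Claim_equal_double_consonants_decode := by
  intro s _
  unfold Spec_double_consonants_decode double_consonants_decode double_consonants_decode_alt
  rw [pvAGo_eq_pvBGo]
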